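-- pv_equiv track=rewrite | github.com/drogers0/clonehunter | src/clonehunter/reporting/html_reporter.py | _covered_in_range
-- ===== SOURCE A (Python) =====
-- def _covered_in_range(spans: list[tuple[int, int]], start: int, end: int) -> int:
--     if start > end:
--         return 0
--     covered = 0
--     for span_start, span_end in _merge_spans(spans):
--         overlap_start = max(start, span_start)
--         overlap_end = min(end, span_end)
--         if overlap_start <= overlap_end:
--             covered += overlap_end - overlap_start + 1
--     return covered
--
-- def _merge_spans(spans: list[tuple[int, int]]) -> list[tuple[int, int]]:
--     if not spans:
--         return []
--     merged: list[tuple[int, int]] = []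
--     for start, end in sorted(spans):
--         if not merged or start > merged[-1][1] + 1:
--             merged.append((start, end))
--             continue
--         prev_start, prev_end = merged[-1]
--         if end > prev_end:
--             merged[-1] = (prev_start, end)
--     return merged
-- ===== SOURCE B (Python) =====
-- def _covered_in_range(spans: list[tuple[int, int]], start: int, end: int) -> int:
--     if start > end:
--         return 0
--     total = 0
--     frontier = start - 1  # every covered position <= frontier has been counted
--     for s, e in sorted(spans):
--         lo = max(s, start, frontier + 1)
--         hi = min(e, end)
--         if lo <= hi:
--             total += hi - lo + 1
--             frontier = hi
--     return total
-- ===== Notes on version B (the rewrite author's own statement) =====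
-- stated objective: simpler
-- what changed: Drops the _merge_spans helper and the second clipping pass: one sorted sweep with a scalar 'frontier' watermark counts each span's yet-uncounted clipped portion directly, instead of building and mutating a merged-interval list and then summing clipped overlaps.
import Mathlib
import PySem

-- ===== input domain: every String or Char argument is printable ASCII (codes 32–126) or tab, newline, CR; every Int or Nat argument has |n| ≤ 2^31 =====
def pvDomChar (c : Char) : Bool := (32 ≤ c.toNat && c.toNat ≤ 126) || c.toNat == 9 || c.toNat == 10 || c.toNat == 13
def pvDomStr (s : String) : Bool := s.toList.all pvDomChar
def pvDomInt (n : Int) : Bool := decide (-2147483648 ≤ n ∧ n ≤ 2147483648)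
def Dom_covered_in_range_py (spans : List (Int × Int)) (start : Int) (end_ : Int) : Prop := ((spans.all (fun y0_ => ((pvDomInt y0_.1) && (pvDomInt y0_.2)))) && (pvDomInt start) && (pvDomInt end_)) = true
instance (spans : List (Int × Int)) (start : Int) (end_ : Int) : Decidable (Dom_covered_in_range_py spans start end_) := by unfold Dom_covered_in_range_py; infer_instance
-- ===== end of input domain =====

-- B drops the sort-and-merge interval list and counts the union in one sorted pass with a scalar
-- "frontier" watermark (objective: simpler — no merge helper, one loop); same return value everywhere.

-- ===== PORT A =====
-- one iteration of _merge_spans' loop body (merged[-1] read = getLast?; 'merged[-1] = (…)' = dropLast ++ [(…)])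
def pvMergeStep (merged : List (Int × Int)) (se : Int × Int) : List (Int × Int) :=
  match merged.getLast? with
  | none => merged ++ [se]
  | some last =>
    if se.1 > last.2 + 1 then merged ++ [se]
    else if se.2 > last.2 then merged.dropLast ++ [(last.1, se.2)]
    else merged

def pvMergeSpans (spans : List (Int × Int)) : List (Int × Int) :=
  if spans = [] then []
  else (PySem.List.sorted2 spans (fun p => p.1) (fun p => p.2)).foldl pvMergeStep []

def covered_in_range_py (spans : List (Int × Int)) (start : Int) (end_ : Int) : Int :=
  if start > end_ then 0
  else (pvMergeSpans spans).foldl (fun covered p =>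
    if max start p.1 ≤ min end_ p.2 then covered + (min end_ p.2 - max start p.1 + 1) else covered) 0

-- ===== PORT B =====
def covered_in_range_py_alt (spans : List (Int × Int)) (start : Int) (end_ : Int) : Int :=
  if start > end_ then 0
  else
    ((PySem.List.sorted2 spans (fun p => p.1) (fun p => p.2)).foldl
      (fun (st : Int × Int) se =>
        if max (max se.1 start) (st.2 + 1) ≤ min se.2 end_ then
          (st.1 + (min se.2 end_ - max (max se.1 start) (st.2 + 1) + 1), min se.2 end_)
        else st)
      (0, start - 1)).1

-- ===== PRECONDITION & SPEC =====
def Spec_covered_in_range_py (spans : List (Int × Int)) (start : Int) (end_ : Int) (out : Int) : Prop := out = covered_in_range_py_alt spans start end_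
instance (spans : List (Int × Int)) (start : Int) (end_ : Int) (out : Int) : Decidable (Spec_covered_in_range_py spans start end_ out) := by unfold Spec_covered_in_range_py; infer_instance

-- ===== CLAIM (what is proved, stated in full; the proofs are below) =====
def Claim_equal_covered_in_range_py : Prop := ∀ (spans : List (Int × Int)) (start : Int) (end_ : Int), Dom_covered_in_range_py spans start end_ → Spec_covered_in_range_py spans start end_ (covered_in_range_py spans start end_)

-- ===== LEMMAS AND PROOFS =====

-- the set of integers in [start, end_] covered by some span of l
noncomputable def pvCov (start end_ : Int) (l : List (Int × Int)) : Finset Int :=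
  (Finset.Icc start end_).filter (fun x => l.any (fun p => decide (p.1 ≤ x ∧ x ≤ p.2)) = true)

-- gap relation between merged intervals
def pvGap (p q : Int × Int) : Prop := p.2 + 1 < q.1

-- A's counting-loop body and B's loop body, named so the foldl lemmas can speak about them
def pvStepA (start end_ covered : Int) (p : Int × Int) : Int :=
  if max start p.1 ≤ min end_ p.2 then covered + (min end_ p.2 - max start p.1 + 1) else covered

def pvStepB (start end_ : Int) (st : Int × Int) (se : Int × Int) : Int × Int :=
  if max (max se.1 start) (st.2 + 1) ≤ min se.2 end_ then
    (st.1 + (min se.2 end_ - max (max se.1 start) (st.2 + 1) + 1), min se.2 end_)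
  else st

lemma pv_mem_pvCov (start end_ : Int) (l : List (Int × Int)) (x : Int) :
    x ∈ pvCov start end_ l ↔ (start ≤ x ∧ x ≤ end_) ∧ ∃ p ∈ l, p.1 ≤ x ∧ x ≤ p.2 := by
  simp [pvCov, Finset.mem_filter, Finset.mem_Icc, List.any_eq_true]

lemma pv_pvCov_congr (start end_ : Int) (l l' : List (Int × Int))
    (h : ∀ x, (∃ p ∈ l, p.1 ≤ x ∧ x ≤ p.2) ↔ (∃ p ∈ l', p.1 ≤ x ∧ x ≤ p.2)) :
    pvCov start end_ l = pvCov start end_ l' := by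
  apply Finset.ext
  intro x
  rw [pv_mem_pvCov, pv_mem_pvCov, h]

lemma pv_pvCov_cons (start end_ : Int) (p : Int × Int) (l : List (Int × Int)) :
    pvCov start end_ (p :: l) = Finset.Icc (max start p.1) (min end_ p.2) ∪ pvCov start end_ l := by
  apply Finset.ext
  intro x
  simp only [Finset.mem_union, pv_mem_pvCov, Finset.mem_Icc, List.mem_cons]
  constructor
  · rintro ⟨hx, q, (rfl | hq), hcov⟩
    · left; omega
    · right; exact ⟨hx, q, hq, hcov⟩
  · rintro (h | ⟨hx, q, hq, hcov⟩)
    · exact ⟨by omega, p, Or.inl rfl, by omega⟩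
    · exact ⟨hx, q, Or.inr hq, hcov⟩

lemma pv_insertBy_pairwise {α : Type} (R : α → α → Prop) (before : α → α → Bool)
    (hT : ∀ a b c, R a b → R b c → R a c)
    (h1 : ∀ a b, before a b = true → R a b) (h2 : ∀ a b, before a b = false → R b a)
    (x : α) (l : List α) (hl : l.Pairwise R) :
    (PySem.List.insertBy before x l).Pairwise R := by
  induction l with
  | nil => simp [PySem.List.insertBy]
  | cons y ys ih =>
    rw [List.pairwise_cons] at hl
    by_cases hb : before x y = true
    · simp only [PySem.List.insertBy, hb, if_true]
      refine List.Pairwise.cons ?_ (List.Pairwise.cons hl.1 hl.2)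
      intro z hz
      rcases List.mem_cons.mp hz with rfl | hz
      · exact h1 _ _ hb
      · exact hT _ _ _ (h1 _ _ hb) (hl.1 z hz)
    · simp only [PySem.List.insertBy, hb]
      refine List.Pairwise.cons ?_ (ih hl.2)
      intro z hz
      rcases (PySem.List.mem_insertBy _ _ _ _).mp hz with rfl | hz
      · exact h2 _ _ (by simpa using hb)
      · exact hl.1 z hz

lemma pv_foldl_insertBy_pairwise {α : Type} (R : α → α → Prop) (before : α → α → Bool)
    (hT : ∀ a b c, R a b → R b c → R a c)
    (h1 : ∀ a b, before a b = true → R a b) (h2 : ∀ a b, before a b = false → R b a) :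
    ∀ (xs acc : List α), acc.Pairwise R →
      (xs.foldl (fun acc x => PySem.List.insertBy before x acc) acc).Pairwise R := by
  intro xs
  induction xs with
  | nil => intro acc h; simpa using h
  | cons x xs ih =>
    intro acc h
    exact ih _ (pv_insertBy_pairwise R before hT h1 h2 x acc h)

lemma pv_sorted2_pairwise_fst (spans : List (Int × Int)) :
    (PySem.List.sorted2 spans (fun p => p.1) (fun p => p.2)).Pairwise
      (fun p q : Int × Int => p.1 ≤ q.1) := by
  unfold PySem.List.sorted2
  simp only [if_neg (by decide : ¬ (false = true))]
  apply pv_foldl_insertBy_pairwise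
  · intro a b c hab hbc; exact le_trans hab hbc
  · intro a b h
    simp at h; omega
  · intro a b h
    simp at h; omega
  · exact List.Pairwise.nil

-- A's counting loop with an accumulator shift
lemma pv_count_shift (start end_ : Int) (l : List (Int × Int)) (c : Int) :
    l.foldl (pvStepA start end_) c = c + l.foldl (pvStepA start end_) 0 := by
  induction l generalizing c with
  | nil => simp
  | cons p l ih =>
    rw [List.foldl_cons, List.foldl_cons, ih, ih (pvStepA start end_ 0 p)]
    unfold pvStepA
    split <;> omega

-- on a gap-pairwise list, A's counting loop computes the covered-set cardinality
lemma pv_count_eq_card (start end_ : Int) (l : List (Int × Int)) (hl : l.Pairwise pvGap) :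
    l.foldl (pvStepA start end_) 0 = ((pvCov start end_ l).card : Int) := by
  induction l with
  | nil => simp [pvCov]
  | cons p l ih =>
    rw [List.pairwise_cons] at hl
    rw [List.foldl_cons, pv_count_shift, ih hl.2, pv_pvCov_cons]
    have hdisj : Disjoint (Finset.Icc (max start p.1) (min end_ p.2)) (pvCov start end_ l) := by
      rw [Finset.disjoint_left]
      intro x hx hx'
      rw [Finset.mem_Icc] at hx
      rw [pv_mem_pvCov] at hx'
      obtain ⟨-, q, hq, hcov⟩ := hx'
      have := hl.1 q hq
      unfold pvGap at this
      omega
    rw [Finset.card_union_of_disjoint hdisj]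
    unfold pvStepA
    by_cases h : max start p.1 ≤ min end_ p.2
    · rw [if_pos h, Int.card_Icc]
      push_cast [Int.toNat_of_nonneg (by omega : (0:Int) ≤ min end_ p.2 + 1 - max start p.1)]
      omega
    · rw [if_neg h, Finset.Icc_eq_empty (by omega)]
      simp

-- one merge-loop step keeps the gap property, keeps starts below the remaining starts,
-- and covers exactly what it covered before plus the new span
lemma pv_merge_step (merged : List (Int × Int)) (se : Int × Int) (rest : List (Int × Int))
    (hse_rest : ∀ r ∈ rest, se.1 ≤ r.1)
    (hle : ∀ p ∈ merged, p.1 ≤ se.1)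
    (hle' : ∀ p ∈ merged, ∀ r ∈ rest, p.1 ≤ r.1)
    (hgap : merged.Pairwise pvGap) :
    (pvMergeStep merged se).Pairwise pvGap ∧
    (∀ q ∈ pvMergeStep merged se, ∀ r ∈ rest, q.1 ≤ r.1) ∧
    (∀ x, (∃ p ∈ pvMergeStep merged se, p.1 ≤ x ∧ x ≤ p.2) ↔
      (∃ p ∈ merged, p.1 ≤ x ∧ x ≤ p.2) ∨ (se.1 ≤ x ∧ x ≤ se.2)) := by
  cases hm : merged.getLast? with
  | none =>
    have hnil : merged = [] := List.getLast?_eq_none_iff.mp hm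
    subst hnil
    have hstep : pvMergeStep [] se = [se] := by simp [pvMergeStep]
    rw [hstep]
    refine ⟨by simp, ?_, ?_⟩
    · intro q hq r hr
      rcases List.mem_singleton.mp hq with rfl
      exact hse_rest r hr
    · intro x; simp
  | some last =>
    obtain ⟨m', rfl⟩ := List.getLast?_eq_some_iff.mp hm
    rw [List.pairwise_append] at hgap
    have hml : ∀ p ∈ m', pvGap p last := by
      intro p hp; exact hgap.2.2 p hp last (List.mem_singleton.mpr rfl)
    have hlast_le : last.1 ≤ se.1 := hle last (by simp)
    by_cases h1 : se.1 > last.2 + 1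
    · have hstep : pvMergeStep (m' ++ [last]) se = (m' ++ [last]) ++ [se] := by
        simp [pvMergeStep, hm, h1]
      rw [hstep]
      refine ⟨?_, ?_, ?_⟩
      · rw [List.pairwise_append]
        refine ⟨by rw [List.pairwise_append]; exact hgap, by simp, ?_⟩
        intro p hp q hq
        rcases List.mem_singleton.mp hq with rfl
        rcases List.mem_append.mp hp with hp | hp
        · have := hml p hp; unfold pvGap at *; omega
        · rcases List.mem_singleton.mp hp with rfl
          unfold pvGap; omega
      · intro q hq r hr
        rcases List.mem_append.mp hq with hq | hq
        · exact hle' q hq r hr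
        · rcases List.mem_singleton.mp hq with rfl
          exact hse_rest r hr
      · intro x
        simp only [List.mem_append, List.mem_singleton]
        constructor
        · rintro ⟨p, (hp | rfl), hcov⟩
          · exact Or.inl ⟨p, hp, hcov⟩
          · exact Or.inr hcov
        · rintro (⟨p, hp, hcov⟩ | hcov)
          · exact ⟨p, Or.inl hp, hcov⟩
          · exact ⟨se, Or.inr rfl, hcov⟩
    · by_cases h2 : se.2 > last.2
      · have hstep : pvMergeStep (m' ++ [last]) se = m' ++ [(last.1, se.2)] := by
          simp [pvMergeStep, hm, h1, h2]
        rw [hstep]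
        refine ⟨?_, ?_, ?_⟩
        · rw [List.pairwise_append]
          refine ⟨hgap.1, by simp, ?_⟩
          intro p hp q hq
          rcases List.mem_singleton.mp hq with rfl
          exact hml p hp
        · intro q hq r hr
          rcases List.mem_append.mp hq with hq | hq
          · exact hle' q (List.mem_append.mpr (Or.inl hq)) r hr
          · rcases List.mem_singleton.mp hq with rfl
            exact hle' last (by simp) r hr
        · intro x
          simp only [List.mem_append, List.mem_singleton]
          constructor
          · rintro ⟨p, hp', hcov⟩
            rcases hp' with hp | hpe
            · exact Or.inl ⟨p, Or.inl hp, hcov⟩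
            · rw [hpe] at hcov
              have hcov1 : last.1 ≤ x := hcov.1
              have hcov2 : x ≤ se.2 := hcov.2
              by_cases hx : x ≤ last.2
              · exact Or.inl ⟨last, Or.inr rfl, ⟨hcov1, hx⟩⟩
              · exact Or.inr ⟨by omega, hcov2⟩
          · rintro (⟨p, hp', hcov⟩ | hcov)
            · rcases hp' with hp | hpl
              · exact ⟨p, Or.inl hp, hcov⟩
              · rw [hpl] at hcov
                refine ⟨(last.1, se.2), Or.inr rfl, ?_, ?_⟩
                · show last.1 ≤ x; exact hcov.1
                · show x ≤ se.2; have h' : x ≤ last.2 := hcov.2; omega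
            · refine ⟨(last.1, se.2), Or.inr rfl, ?_, ?_⟩
              · show last.1 ≤ x; omega
              · show x ≤ se.2; omega
      · have hstep : pvMergeStep (m' ++ [last]) se = m' ++ [last] := by
          simp [pvMergeStep, hm, h1, h2]
        rw [hstep]
        refine ⟨by rw [List.pairwise_append]; exact hgap, hle', ?_⟩
        intro x
        constructor
        · exact Or.inl
        · rintro (h | hcov)
          · exact h
          · exact ⟨last, by simp, by omega⟩

-- merge loop invariant: the fold keeps the gap property and covers exactly old ∪ new
lemma pv_merge_invariant :
    ∀ (l merged : List (Int × Int)),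
      l.Pairwise (fun p q => p.1 ≤ q.1) →
      (∀ p ∈ merged, ∀ q ∈ l, p.1 ≤ q.1) →
      merged.Pairwise pvGap →
      (l.foldl pvMergeStep merged).Pairwise pvGap ∧
      (∀ x, (∃ p ∈ l.foldl pvMergeStep merged, p.1 ≤ x ∧ x ≤ p.2) ↔
        (∃ p ∈ merged, p.1 ≤ x ∧ x ≤ p.2) ∨ (∃ p ∈ l, p.1 ≤ x ∧ x ≤ p.2)) := by
  intro l
  induction l with
  | nil =>
    intro merged _ _ hgap
    refine ⟨hgap, fun x => ?_⟩
    simp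
  | cons se rest ih =>
    intro merged hsort hle hgap
    rw [List.pairwise_cons] at hsort
    obtain ⟨hstep_gap, hstep_le, hstep_cov⟩ :=
      pv_merge_step merged se rest hsort.1
        (fun p hp => hle p hp se (List.mem_cons_self ..))
        (fun p hp r hr => hle p hp r (List.mem_cons_of_mem _ hr))
        hgap
    obtain ⟨hres_gap, hres_cov⟩ := ih (pvMergeStep merged se) hsort.2 hstep_le hstep_gap
    rw [List.foldl_cons]
    refine ⟨hres_gap, fun x => ?_⟩
    rw [hres_cov x, hstep_cov x]
    simp only [List.mem_cons]
    constructor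
    · rintro ((h | h) | h)
      · exact Or.inl h
      · exact Or.inr ⟨se, Or.inl rfl, h⟩
      · obtain ⟨p, hp, hc⟩ := h
        exact Or.inr ⟨p, Or.inr hp, hc⟩
    · rintro (h | ⟨p, (rfl | hp), hc⟩)
      · exact Or.inl (Or.inl h)
      · exact Or.inl (Or.inr hc)
      · exact Or.inr ⟨p, hp, hc⟩

-- A computes the covered-set cardinality
lemma pv_A_eq_card (spans : List (Int × Int)) (start end_ : Int) (h : ¬ start > end_) :
    covered_in_range_py spans start end_ = ((pvCov start end_ spans).card : Int) := by
  unfold covered_in_range_py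
  rw [if_neg h]
  have hfun : (fun (covered : Int) (p : Int × Int) =>
      if max start p.1 ≤ min end_ p.2 then covered + (min end_ p.2 - max start p.1 + 1) else covered)
      = pvStepA start end_ := rfl
  rw [hfun]
  by_cases hsp : spans = []
  · subst hsp
    simp [pvMergeSpans, pvCov]
  · have hmerge : pvMergeSpans spans
        = (PySem.List.sorted2 spans (fun p => p.1) (fun p => p.2)).foldl pvMergeStep [] := by
      simp [pvMergeSpans, hsp]
    obtain ⟨hgap, hcov⟩ := pv_merge_invariant
      (PySem.List.sorted2 spans (fun p => p.1) (fun p => p.2)) []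
      (pv_sorted2_pairwise_fst spans) (by simp) List.Pairwise.nil
    rw [hmerge, pv_count_eq_card start end_ _ hgap]
    have hperm := PySem.List.sorted2_perm spans (fun p => p.1) (fun p => p.2) false
    have hcc : pvCov start end_
        ((PySem.List.sorted2 spans (fun p => p.1) (fun p => p.2)).foldl pvMergeStep [])
        = pvCov start end_ spans := by
      apply pv_pvCov_congr
      intro x
      rw [hcov x]
      constructor
      · rintro (h' | ⟨p, hp, hc⟩)
        · simp at h'
        · exact ⟨p, hperm.mem_iff.mp hp, hc⟩
      · rintro ⟨p, hp, hc⟩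
        exact Or.inr ⟨p, hperm.mem_iff.mpr hp, hc⟩
    rw [hcc]

-- B's watermark loop invariant: the counted total is the size of the set C of already-counted
-- positions; everything counted lies in [start, frontier] ∩ [start, end_]; and (unless nothing was
-- counted yet) [max start a, frontier] is fully counted for some a below all remaining starts
lemma pv_water (start end_ : Int) :
    ∀ (l : List (Int × Int)) (C : Finset Int) (total frontier : Int),
      l.Pairwise (fun p q => p.1 ≤ q.1) →
      total = (C.card : Int) →
      (∀ x ∈ C, start ≤ x ∧ x ≤ end_ ∧ x ≤ frontier) →
      start - 1 ≤ frontier →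
      (frontier = start - 1 ∨ (frontier ≤ end_ ∧
        ∃ a, (∀ q ∈ l, a ≤ q.1) ∧ ∀ x, max start a ≤ x → x ≤ frontier → x ∈ C)) →
      (l.foldl (pvStepB start end_) (total, frontier)).1
        = ((C ∪ pvCov start end_ l).card : Int) := by
  intro l
  induction l with
  | nil =>
    intro C total frontier _ htot _ _ _
    simpa [pvCov] using htot
  | cons se rest ih =>
    intro C total frontier hsort htot hC hfr hI3
    rw [List.pairwise_cons] at hsort
    rw [List.foldl_cons]
    have hclip : ∀ x, max start se.1 ≤ x → x ≤ min end_ se.2 → x ≤ frontier → x ∈ C := by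
      intro x hx1 hx2 hx3
      rcases hI3 with h | ⟨_, a, ha, hmem⟩
      · omega
      · have has : a ≤ se.1 := ha se (List.mem_cons_self ..)
        exact hmem x (by omega) hx3
    by_cases hcase : max (max se.1 start) (frontier + 1) ≤ min se.2 end_
    · have hstepeq : pvStepB start end_ (total, frontier) se
          = (total + (min se.2 end_ - max (max se.1 start) (frontier + 1) + 1), min se.2 end_) := by
        simp only [pvStepB, hcase, if_pos]
      rw [hstepeq]
      set lo := max (max se.1 start) (frontier + 1) with hlo
      set hi := min se.2 end_ with hhi
      have hdisj : Disjoint C (Finset.Icc lo hi) := by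
        rw [Finset.disjoint_left]
        intro x hx hx'
        rw [Finset.mem_Icc] at hx'
        have := hC x hx
        omega
      have hcard : total + (hi - lo + 1) = (((C ∪ Finset.Icc lo hi).card : Nat) : Int) := by
        rw [Finset.card_union_of_disjoint hdisj, Int.card_Icc]
        push_cast [Int.toNat_of_nonneg (by omega : (0:Int) ≤ hi + 1 - lo)]
        omega
      have hCunion : C ∪ pvCov start end_ (se :: rest)
          = (C ∪ Finset.Icc lo hi) ∪ pvCov start end_ rest := by
        rw [pv_pvCov_cons]
        apply Finset.ext
        intro x
        simp only [Finset.mem_union]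
        constructor
        · rintro (h | h | h)
          · exact Or.inl (Or.inl h)
          · rw [Finset.mem_Icc] at h
            by_cases hxlo : lo ≤ x
            · exact Or.inl (Or.inr (Finset.mem_Icc.mpr ⟨hxlo, by omega⟩))
            · exact Or.inl (Or.inl (hclip x (by omega) (by omega) (by omega)))
          · exact Or.inr h
        · rintro ((h | h) | h)
          · exact Or.inl h
          · rw [Finset.mem_Icc] at h
            exact Or.inr (Or.inl (Finset.mem_Icc.mpr ⟨by omega, by omega⟩))
          · exact Or.inr (Or.inr h)
      rw [hCunion]
      apply ih (C ∪ Finset.Icc lo hi) _ hi hsort.2 hcard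
      · intro x hx
        rcases Finset.mem_union.mp hx with hx | hx
        · have := hC x hx; omega
        · rw [Finset.mem_Icc] at hx; omega
      · omega
      · refine Or.inr ⟨by omega, se.1, hsort.1, ?_⟩
        intro x hx1 hx2
        by_cases hxlo : lo ≤ x
        · exact Finset.mem_union.mpr (Or.inr (Finset.mem_Icc.mpr ⟨hxlo, hx2⟩))
        · exact Finset.mem_union.mpr (Or.inl (hclip x hx1 (by omega) (by omega)))
    · have hstepeq : pvStepB start end_ (total, frontier) se = (total, frontier) := by
        simp only [pvStepB, if_neg hcase]
      rw [hstepeq]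
      have hCunion : C ∪ pvCov start end_ (se :: rest) = C ∪ pvCov start end_ rest := by
        rw [pv_pvCov_cons]
        apply Finset.ext
        intro x
        simp only [Finset.mem_union]
        constructor
        · rintro (h | h | h)
          · exact Or.inl h
          · rw [Finset.mem_Icc] at h
            exact Or.inl (hclip x (by omega) (by omega) (by omega))
          · exact Or.inr h
        · rintro (h | h)
          · exact Or.inl h
          · exact Or.inr (Or.inr h)
      rw [hCunion]
      apply ih C total frontier hsort.2 htot hC hfr
      rcases hI3 with h | ⟨he, a, ha, hmem⟩
      · exact Or.inl h
      · exact Or.inr ⟨he, a, fun q hq => ha q (List.mem_cons_of_mem _ hq), hmem⟩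

-- B computes the covered-set cardinality
lemma pv_B_eq_card (spans : List (Int × Int)) (start end_ : Int) (h : ¬ start > end_) :
    covered_in_range_py_alt spans start end_ = ((pvCov start end_ spans).card : Int) := by
  unfold covered_in_range_py_alt
  rw [if_neg h]
  have hfun : (fun (st : Int × Int) (se : Int × Int) =>
      if max (max se.1 start) (st.2 + 1) ≤ min se.2 end_ then
        (st.1 + (min se.2 end_ - max (max se.1 start) (st.2 + 1) + 1), min se.2 end_)
      else st) = pvStepB start end_ := rfl
  rw [hfun]
  rw [pv_water start end_ _ ∅ 0 (start - 1) (pv_sorted2_pairwise_fst spans) (by simp)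
    (by simp) (by omega) (Or.inl rfl)]
  rw [Finset.empty_union]
  have hperm := PySem.List.sorted2_perm spans (fun p => p.1) (fun p => p.2) false
  have hcc : pvCov start end_ (PySem.List.sorted2 spans (fun p => p.1) (fun p => p.2))
      = pvCov start end_ spans := by
    apply pv_pvCov_congr
    intro x
    constructor
    · rintro ⟨p, hp, hc⟩; exact ⟨p, hperm.mem_iff.mp hp, hc⟩
    · rintro ⟨p, hp, hc⟩; exact ⟨p, hperm.mem_iff.mpr hp, hc⟩
  rw [hcc]

-- ===== VERDICT (by name: the statement is the Claim_ definition above) =====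
theorem covered_in_range_py_spec : Claim_equal_covered_in_range_py := by
  intro spans start end_ _
  unfold Spec_covered_in_range_py
  by_cases h : start > end_
  · unfold covered_in_range_py covered_in_range_py_alt
    rw [if_pos h, if_pos h]
  · rw [pv_A_eq_card spans start end_ h, pv_B_eq_card spans start end_ h]
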